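-- pv_equiv track=rewrite | github.com/lizhengping/lidarpolt | Tool.py | snakelike_list
-- ===== SOURCE A (Python) =====
-- def snakelike_list(xNum,yNum,step):
--     xTarget = []
--     yTarget = []
--     x=[]
--     V1 = 0
--     V2 = 0
--
--     for i in range(yNum):
--         yTarget += [i * step] * xNum
--
--     for j in range(xNum):
--         x.append(step*j)
--
--     r = [i for i in x]
--     r.reverse()
--     x2 =x + r
--
--     if (yNum % 2) == 0:
--          xTarget = x2 * int(yNum / 2)
--     if (yNum % 2) == 1:
--          xTarget = x2 * int(yNum / 2) + x
--
--     return xTarget,yTarget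
-- ===== SOURCE B (Python) =====
-- def snakelike_list(xNum, yNum, step):
--     ramp = [step * j for j in range(xNum)]
--     xTarget = []
--     yTarget = []
--     for i in range(yNum):
--         xTarget += ramp if i % 2 == 0 else ramp[::-1]
--         yTarget += [i * step] * xNum
--     return xTarget, yTarget
-- ===== Notes on version B (the rewrite author's own statement) =====
-- stated objective: simpler
-- what changed: B emits the snake row by row in one loop (forward ramp on even rows, reversed on odd), instead of A's reversed-copy concatenation and list-multiplication with parity arithmetic on yNum.
-- intended difference: For negative odd yNum with xNum > 0 A returns a non-empty xTarget ([step*j for j in range(xNum)], an artefact of multiplying a list by the negative int(yNum/2)) with an empty yTarget; B returns ([], []), the intended empty grid for a non-positive row count. — e.g. on snakelike_list(2, -1, 1): A returns ([0, 1], []), B returns ([], [])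
import Mathlib
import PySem

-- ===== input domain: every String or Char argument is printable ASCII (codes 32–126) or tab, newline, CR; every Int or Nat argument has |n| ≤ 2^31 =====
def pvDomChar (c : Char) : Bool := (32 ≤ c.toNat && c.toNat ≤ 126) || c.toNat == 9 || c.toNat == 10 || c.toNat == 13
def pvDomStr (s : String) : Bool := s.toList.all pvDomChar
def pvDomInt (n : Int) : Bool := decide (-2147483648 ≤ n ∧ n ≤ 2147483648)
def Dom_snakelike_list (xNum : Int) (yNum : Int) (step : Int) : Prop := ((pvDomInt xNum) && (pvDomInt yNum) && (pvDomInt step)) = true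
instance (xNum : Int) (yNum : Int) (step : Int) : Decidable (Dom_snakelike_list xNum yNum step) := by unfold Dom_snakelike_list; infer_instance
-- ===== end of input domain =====

-- B builds the snake row by row in one loop (forward ramp on even rows, reversed on odd)
-- instead of A's reversed-copy concatenation and list-multiplication parity arithmetic; same cost, simpler.

-- ===== PORT A =====
-- Python lists under repeated append/+= are modelled as Array (O(1) amortized append), read out with .toList.
def snakelike_list (xNum : Int) (yNum : Int) (step : Int) : List Int × List Int :=
  -- for i in range(yNum): yTarget += [i*step]*xNum
  let yTarget := ((PySem.List.pyRange 0 yNum 1).foldl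
    (fun acc i => acc.appendList (PySem.List.pyRepeat [i * step] xNum)) (#[] : Array Int)).toList
  -- for j in range(xNum): x.append(step*j)
  let x := ((PySem.List.pyRange 0 xNum 1).foldl
    (fun acc j => acc.appendList [step * j]) (#[] : Array Int)).toList
  let r := x.reverse
  let x2 := x ++ r
  let xTarget : List Int := []
  -- int(yNum/2): true division then int() truncates toward zero = Int.tdiv (exact: |yNum| ≤ 2^31 < 2^53)
  let xTarget := if PySem.Int.mod yNum 2 = 0 then PySem.List.pyRepeat x2 (Int.tdiv yNum 2) else xTarget
  let xTarget := if PySem.Int.mod yNum 2 = 1 then PySem.List.pyRepeat x2 (Int.tdiv yNum 2) ++ x else xTarget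
  (xTarget, yTarget)

-- ===== PORT B =====
def snakelike_list_alt (xNum : Int) (yNum : Int) (step : Int) : List Int × List Int :=
  let ramp := (PySem.List.pyRange 0 xNum 1).map (fun j => step * j)
  let p := (PySem.List.pyRange 0 yNum 1).foldl
    (fun acc i =>
      (acc.1.appendList (if PySem.Int.mod i 2 = 0 then ramp else ramp.reverse),
       acc.2.appendList (PySem.List.pyRepeat [i * step] xNum)))
    ((#[] : Array Int), (#[] : Array Int))
  (p.1.toList, p.2.toList)

-- ===== PRECONDITION & SPEC =====
-- For negative odd yNum with xNum > 0, A returns the non-empty ramp as xTarget (an artefact of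
-- multiplying a list by the negative int(yNum/2)) with an empty yTarget; B returns ([], []),
-- the intended empty grid for a non-positive row count.
def D_snakelike_list (xNum : Int) (yNum : Int) (step : Int) : Prop :=
  yNum < 0 ∧ PySem.Int.mod yNum 2 = 1 ∧ 0 < xNum
instance (xNum : Int) (yNum : Int) (step : Int) : Decidable (D_snakelike_list xNum yNum step) := by
  unfold D_snakelike_list; infer_instance

def Spec_snakelike_list (xNum : Int) (yNum : Int) (step : Int) (out : List Int × List Int) : Prop :=
  ¬ D_snakelike_list xNum yNum step → out = snakelike_list_alt xNum yNum step
instance (xNum : Int) (yNum : Int) (step : Int) (out : List Int × List Int) : Decidable (Spec_snakelike_list xNum yNum step out) := by unfold Spec_snakelike_list; infer_instance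

def pvDiffWitness_snakelike_list : Int × Int × Int := (2, -1, 1)
def pvDiffWitnessOut_snakelike_list : (List Int × List Int) × (List Int × List Int) :=
  (([0, 1], []), ([], []))

-- ===== CLAIM (what is proved, stated in full; the proofs are below) =====
def Claim_unchanged_snakelike_list : Prop := ∀ (xNum : Int) (yNum : Int) (step : Int), Dom_snakelike_list xNum yNum step → Spec_snakelike_list xNum yNum step (snakelike_list xNum yNum step)
def Claim_changed_snakelike_list : Prop := Dom_snakelike_list (pvDiffWitness_snakelike_list.1) (pvDiffWitness_snakelike_list.2.1) (pvDiffWitness_snakelike_list.2.2) ∧ D_snakelike_list (pvDiffWitness_snakelike_list.1) (pvDiffWitness_snakelike_list.2.1) (pvDiffWitness_snakelike_list.2.2) ∧ snakelike_list (pvDiffWitness_snakelike_list.1) (pvDiffWitness_snakelike_list.2.1) (pvDiffWitness_snakelike_list.2.2) = pvDiffWitnessOut_snakelike_list.1 ∧ snakelike_list_alt (pvDiffWitness_snakelike_list.1) (pvDiffWitness_snakelike_list.2.1) (pvDiffWitness_snakelike_list.2.2) = pvDiffWitnessOut_snakelike_list.2 ∧ pvDiffWitnessOut_snakelike_list.1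 ≠ pvDiffWitnessOut_snakelike_list.2
def Claim_exact_snakelike_list : Prop := ∀ (xNum : Int) (yNum : Int) (step : Int), Dom_snakelike_list xNum yNum step → D_snakelike_list xNum yNum step → snakelike_list xNum yNum step ≠ snakelike_list_alt xNum yNum step

-- ===== LEMMAS AND PROOFS =====

-- reading an Array-accumulated append loop back as the list-append loop
lemma toList_foldl_appendList (f : Int -> List Int) (l : List Int) (arr : Array Int) :
    (List.foldl (fun (a : Array Int) x => a.appendList (f x)) arr l).toList
    = List.foldl (fun (acc : List Int) x => acc ++ f x) arr.toList l := by
  induction l generalizing arr with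
  | nil => rfl
  | cons y ys ih =>
    rw [List.foldl_cons, List.foldl_cons, ih]
    simp only [Array.appendList_eq_append, Array.toList_appendList]

lemma pyRepeat_succ_int (xs : List Int) (k : Nat) :
    PySem.List.pyRepeat xs ((k : Int) + 1) = PySem.List.pyRepeat xs (k : Int) ++ xs := by
  have h : ((k : Int) + 1).toNat = k + 1 := by omega
  simp only [PySem.List.pyRepeat, h, Int.toNat_natCast, List.replicate_succ',
    List.flatten_append, List.flatten_cons, List.flatten_nil, List.append_nil]

lemma pyRepeat_of_toNat_zero (xs : List Int) (n : Int) (h : n.toNat = 0) :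
    PySem.List.pyRepeat xs n = [] := by
  simp only [PySem.List.pyRepeat, h, List.replicate_zero, List.flatten_nil]

lemma tdiv_toNat_eq_zero_of_neg (y : Int) (hy : y < 0) : (Int.tdiv y 2).toNat = 0 := by
  have h1 : (0:Int) ≤ (-y).tdiv 2 := Int.tdiv_nonneg (by omega) (by norm_num)
  have h2 : (-(-y)).tdiv 2 = -((-y).tdiv 2) := Int.neg_tdiv (-y) 2
  simp only [neg_neg] at h2
  omega

lemma mod_two_cases (y : Int) : PySem.Int.mod y 2 = 0 ∨ PySem.Int.mod y 2 = 1 := by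
  have h1 := PySem.Int.mod_nonneg y (b := 2) (by norm_num)
  have h2 := PySem.Int.mod_lt y (b := 2) (by norm_num)
  omega

lemma snake_fold (ramp : List Int) (n : Nat) :
    List.foldl (fun (acc : List Int) i => acc ++ (if PySem.Int.mod i 2 = 0 then ramp else ramp.reverse)) []
      (PySem.List.pyRange 0 (n : Int) 1)
    = PySem.List.pyRepeat (ramp ++ ramp.reverse) ((n / 2 : Nat) : Int)
        ++ (if n % 2 = 1 then ramp else []) := by
  induction n with
  | zero =>
    rw [Nat.cast_zero, PySem.List.pyRange_one_eq_nil (by norm_num), List.foldl_nil,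
      pyRepeat_of_toNat_zero _ _ (by norm_num), if_neg (by omega), List.append_nil]
  | succ m ih =>
    have hcast : ((m + 1 : Nat) : Int) = (m : Int) + 1 := by push_cast; ring
    rw [hcast, PySem.List.pyRange_one_succ_right (by positivity), List.foldl_append, ih]
    simp only [List.foldl_cons, List.foldl_nil]
    have hmod : PySem.Int.mod (m : Int) 2 = ((m % 2 : Nat) : Int) := by
      exact_mod_cast PySem.Int.mod_natCast m 2
    rcases Nat.mod_two_eq_zero_or_one m with h | h
    · have e1 : (if PySem.Int.mod (m : Int) 2 = 0 then ramp else ramp.reverse) = ramp := by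
        rw [hmod, h]; norm_num
      rw [e1, if_neg (by omega : ¬ m % 2 = 1), (by omega : (m + 1) / 2 = m / 2),
        (by omega : (m + 1) % 2 = 1), if_pos rfl, List.append_nil]
    · have e1 : (if PySem.Int.mod (m : Int) 2 = 0 then ramp else ramp.reverse) = ramp.reverse := by
        rw [hmod, h]; norm_num
      rw [e1, if_pos h, (by omega : (m + 1) / 2 = m / 2 + 1),
        (by push_cast; ring : ((m / 2 + 1 : Nat) : Int) = ((m / 2 : Nat) : Int) + 1),
        pyRepeat_succ_int, if_neg (by omega : ¬ (m + 1) % 2 = 1), List.append_nil,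
        List.append_assoc]

theorem snakelike_list_spec : Claim_unchanged_snakelike_list := by
  intro xNum yNum step _ hnD
  show snakelike_list xNum yNum step = snakelike_list_alt xNum yNum step
  simp only [snakelike_list, snakelike_list_alt]
  rw [PySem.List.foldl_prod_mk
        (f := fun (a : Array Int) i =>
          a.appendList (if PySem.Int.mod i 2 = 0
                  then (PySem.List.pyRange 0 xNum 1).map (fun j => step * j)
                  else ((PySem.List.pyRange 0 xNum 1).map (fun j => step * j)).reverse))
        (g := fun (a : Array Int) i => a.appendList (PySem.List.pyRepeat [i * step] xNum))]
  rw [toList_foldl_appendList (fun i =>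
        if PySem.Int.mod i 2 = 0
        then (PySem.List.pyRange 0 xNum 1).map (fun j => step * j)
        else ((PySem.List.pyRange 0 xNum 1).map (fun j => step * j)).reverse),
      toList_foldl_appendList (fun i => PySem.List.pyRepeat [i * step] xNum),
      toList_foldl_appendList (fun j => [step * j])]
  rw [PySem.List.foldl_append_singleton_eq_map (f := fun j => step * j)]
  simp only [List.nil_append, Prod.mk.injEq, and_true]
  by_cases hy : yNum < 0
  · have hr : PySem.List.pyRange 0 yNum 1 = [] := PySem.List.pyRange_one_eq_nil (by omega)
    have ht := tdiv_toNat_eq_zero_of_neg yNum hy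
    rw [hr, List.foldl_nil]
    rcases mod_two_cases yNum with h | h
    · rw [if_neg (by omega : ¬ PySem.Int.mod yNum 2 = 1), if_pos h,
        pyRepeat_of_toNat_zero _ _ ht]
    · have hx : xNum ≤ 0 := by
        by_contra hx
        exact hnD ⟨hy, h, by omega⟩
      have hrx : PySem.List.pyRange 0 xNum 1 = [] := PySem.List.pyRange_one_eq_nil (by omega)
      rw [if_pos h, pyRepeat_of_toNat_zero _ _ ht, hrx, List.map_nil, List.append_nil]
  · obtain ⟨n, rfl⟩ : ∃ n : Nat, yNum = (n : Int) :=
      ⟨yNum.toNat, (Int.toNat_of_nonneg (by omega)).symm⟩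
    rw [snake_fold]
    have hmod : PySem.Int.mod (n : Int) 2 = ((n % 2 : Nat) : Int) := by
      exact_mod_cast PySem.Int.mod_natCast n 2
    have hdiv : Int.tdiv (n : Int) 2 = ((n / 2 : Nat) : Int) := by
      simp [Int.tdiv]
    rcases Nat.mod_two_eq_zero_or_one n with h | h
    · rw [if_neg (by rw [hmod, h]; norm_num : ¬ PySem.Int.mod (n : Int) 2 = 1),
        if_pos (by rw [hmod, h]; norm_num : PySem.Int.mod (n : Int) 2 = 0), hdiv,
        if_neg (by omega : ¬ n % 2 = 1), List.append_nil]
    · rw [if_pos (by rw [hmod, h]; norm_num : PySem.Int.mod (n : Int) 2 = 1), hdiv, if_pos h]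

theorem snakelike_list_changed : Claim_changed_snakelike_list := by
  unfold Claim_changed_snakelike_list; decide

theorem snakelike_list_tight : Claim_exact_snakelike_list := by
  intro xNum yNum step _ hD heq
  obtain ⟨hy, hm, hx⟩ := hD
  have hr : PySem.List.pyRange 0 yNum 1 = [] := PySem.List.pyRange_one_eq_nil (by omega)
  have ht := tdiv_toNat_eq_zero_of_neg yNum hy
  have hA : (snakelike_list xNum yNum step).1
      = (PySem.List.pyRange 0 xNum 1).map (fun j => step * j) := by
    simp only [snakelike_list]
    rw [toList_foldl_appendList (fun j => [step * j])]
    simp only [PySem.List.foldl_append_singleton_eq_map (f := fun j => step * j), List.nil_append]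
    rw [if_pos hm, pyRepeat_of_toNat_zero _ _ ht, List.nil_append]
  have hB : (snakelike_list_alt xNum yNum step).1 = [] := by
    simp only [snakelike_list_alt, hr, List.foldl_nil, Array.toList_empty]
  rw [heq, hB] at hA
  have hmem : (0 : Int) ∈ PySem.List.pyRange 0 xNum 1 :=
    PySem.List.mem_pyRange_one.mpr ⟨le_refl 0, hx⟩
  have : (step * 0) ∈ ([] : List Int) := hA ▸ List.mem_map_of_mem hmem
  exact absurd this (List.not_mem_nil)
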